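-- pv_equiv track=rewrite | github.com/mathiasmellemstuen/AdventOfCode2023 | 03/problem_01.py | is_valid_part
-- ===== SOURCE A (Python) =====
-- def is_character_part_character(character):
--     return False if character == "." or character.isdigit() or character == "\n" else True
--
-- def inside_bounds(index, line):
--     return False if line == None else True if index >= 0 and index < len(line) else False
--
-- def is_valid_part(top_line, line, bottom_line, numbers):
--
--     valid = []
--
--     for number_indices in numbers:
--
--         c_valid = False
--
--         for index in number_indices:
--             if inside_bounds(index, top_line) and is_character_part_character(top_line[index]):
--                 c_valid = True
--                 break
--
--             if inside_bounds(index, bottom_line) and is_character_part_character(bottom_line[index]):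
--                 c_valid = True
--                 break
--
--             if inside_bounds(index - 1, bottom_line) and is_character_part_character(bottom_line[index - 1]):
--                 c_valid = True
--                 break
--
--             if inside_bounds(index - 1, top_line) and is_character_part_character(top_line[index - 1]):
--                 c_valid = True
--                 break
--
--             if inside_bounds(index + 1, bottom_line) and is_character_part_character(bottom_line[index + 1]):
--                 c_valid = True
--                 break
--
--             if inside_bounds(index + 1, top_line) and is_character_part_character(top_line[index + 1]):
--                 c_valid = True
--                 break
--
--             if inside_bounds(index + 1, line) and is_character_part_character(line[index + 1]):
--                 c_valid = True
--                 break
--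
--             if inside_bounds(index - 1, line) and is_character_part_character(line[index - 1]):
--                 c_valid = True
--                 break
--
--         valid.append(c_valid)
--
--     return valid
-- ===== SOURCE B (Python) =====
-- def is_valid_part(top_line, line, bottom_line, numbers):
--     # Symbol-centric: each symbol "radiates" the columns it validates
--     # (all three offsets for the rows above/below, only +-1 for the own row);
--     # one membership test per digit index afterwards.
--     active = set()
--     for l, offsets in ((top_line, (-1, 0, 1)), (bottom_line, (-1, 0, 1)), (line, (-1, 1))):
--         if l is not None:
--             for j, ch in enumerate(l):
--                 if ch != '.' and ch != '\n' and not ch.isdigit():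
--                     for d in offsets:
--                         active.add(j + d)
--     return [any(i in active for i in idxs) for idxs in numbers]
-- ===== Notes on version B (the rewrite author's own statement) =====
-- stated objective: alternative
-- what changed: Inverted the direction of the adjacency test: instead of probing eight neighbour cells around every digit index, B scans the three lines once and has every symbol character radiate the set of columns it validates (offsets -1,0,1 for the rows above/below, only -1,+1 for the own row); each number then needs a single set-membership test per index.
import Mathlib
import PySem

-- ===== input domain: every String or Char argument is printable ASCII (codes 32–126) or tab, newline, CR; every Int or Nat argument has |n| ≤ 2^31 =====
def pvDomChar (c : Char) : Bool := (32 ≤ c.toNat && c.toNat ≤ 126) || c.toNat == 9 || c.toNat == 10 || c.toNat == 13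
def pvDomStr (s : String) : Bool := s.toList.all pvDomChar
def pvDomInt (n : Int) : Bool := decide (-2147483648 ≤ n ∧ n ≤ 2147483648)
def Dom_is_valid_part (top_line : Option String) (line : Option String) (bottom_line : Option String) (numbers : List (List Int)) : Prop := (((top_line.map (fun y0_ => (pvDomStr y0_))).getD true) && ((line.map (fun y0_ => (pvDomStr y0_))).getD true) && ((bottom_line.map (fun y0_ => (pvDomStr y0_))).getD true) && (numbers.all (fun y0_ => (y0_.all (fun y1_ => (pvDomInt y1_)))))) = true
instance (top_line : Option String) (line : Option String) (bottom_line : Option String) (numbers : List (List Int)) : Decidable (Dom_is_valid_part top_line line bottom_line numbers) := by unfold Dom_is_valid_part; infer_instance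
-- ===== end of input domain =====

-- B inverts the test: each symbol character radiates the columns it validates into one set
-- (offsets -1,0,1 for top/bottom, -1,+1 for the own row); numbers then do one lookup per index
-- (objective: alternative).

-- ===== PORT A =====
-- is_character_part_character
def partCharA (c : Char) : Bool :=
  if c == '.' || c.isDigit || c == '\n' then false else true

-- inside_bounds
def insideBounds (index : Int) (l : Option String) : Bool :=
  match l with
  | none => false
  | some s => if 0 ≤ index ∧ index < (s.toList.length : Int) then true else false

-- line[index]; only consulted under an insideBounds guard, where pyGet? is some
def charGet (l : Option String) (index : Int) : Char :=
  match l with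
  | none => ' '
  | some s => (PySem.List.pyGet? s.toList index).getD ' '

-- the inner 'for index in number_indices: … break' loop of A
def checkIdxA (top line bottom : Option String) : List Int → Bool
  | [] => false
  | i :: rest =>
    if insideBounds i top && partCharA (charGet top i) then true
    else if insideBounds i bottom && partCharA (charGet bottom i) then true
    else if insideBounds (i - 1) bottom && partCharA (charGet bottom (i - 1)) then true
    else if insideBounds (i - 1) top && partCharA (charGet top (i - 1)) then true
    else if insideBounds (i + 1) bottom && partCharA (charGet bottom (i + 1)) then true
    else if insideBounds (i + 1) top && partCharA (charGet top (i + 1)) then true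
    else if insideBounds (i + 1) line && partCharA (charGet line (i + 1)) then true
    else if insideBounds (i - 1) line && partCharA (charGet line (i - 1)) then true
    else checkIdxA top line bottom rest

def is_valid_part (top_line : Option String) (line : Option String) (bottom_line : Option String) (numbers : List (List Int)) : List Bool :=
  numbers.foldl (fun valid number_indices => valid ++ [checkIdxA top_line line bottom_line number_indices]) []

-- ===== PORT B =====
def partCharB (c : Char) : Bool :=
  c != '.' && c != '\n' && !c.isDigit

-- 'for j, ch in enumerate(l): if symbol: for d in offsets: active.add(j + d)'
def addLine (l : Option String) (offs : List Int) (s : PySem.Set Int) : PySem.Set Int :=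
  match l with
  | none => s
  | some str =>
      (PySem.List.enumerate str.toList).foldl
        (fun acc p =>
          if partCharB p.2 then offs.foldl (fun a d => PySem.Set.add a (p.1 + d)) acc else acc) s

def is_valid_part_alt (top_line : Option String) (line : Option String) (bottom_line : Option String) (numbers : List (List Int)) : List Bool :=
  let active :=
    addLine line [-1, 1]
      (addLine bottom_line [-1, 0, 1]
        (addLine top_line [-1, 0, 1] PySem.Set.empty))
  numbers.map (fun idxs => idxs.any (fun i => PySem.Set.contains active i))

-- ===== PRECONDITION & SPEC =====
def Spec_is_valid_part (top_line : Option String) (line : Option String) (bottom_line : Option String) (numbers : List (List Int)) (out : List Bool) : Prop := out = is_valid_part_alt top_line line bottom_line numbers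
instance (top_line : Option String) (line : Option String) (bottom_line : Option String) (numbers : List (List Int)) (out : List Bool) : Decidable (Spec_is_valid_part top_line line bottom_line numbers out) := by unfold Spec_is_valid_part; infer_instance

-- ===== CLAIM =====
def Claim_equal_is_valid_part : Prop := ∀ (top_line : Option String) (line : Option String) (bottom_line : Option String) (numbers : List (List Int)), Dom_is_valid_part top_line line bottom_line numbers → Spec_is_valid_part top_line line bottom_line numbers (is_valid_part top_line line bottom_line numbers)

-- ===== LEMMAS AND PROOFS =====
-- "a symbol sits at column j of line l" (exactly A's guarded probe)
def symAt (l : Option String) (j : Int) : Bool :=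
  insideBounds j l && partCharA (charGet l j)

theorem partChar_eq (c : Char) : partCharB c = partCharA c := by
  simp [partCharA, partCharB, bne]; ac_rfl

theorem mem_inner_fold (offs : List Int) (acc : PySem.Set Int) (j y : Int) :
    y ∈ offs.foldl (fun a d => PySem.Set.add a (j + d)) acc ↔ y ∈ acc ∨ ∃ d ∈ offs, y = j + d := by
  induction offs generalizing acc with
  | nil => simp
  | cons d ds ih =>
    simp only [List.foldl_cons, ih, PySem.Set.mem_add, List.mem_cons]
    constructor
    · rintro (⟨h | h⟩ | ⟨e, he, rfl⟩)
      · exact Or.inl h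
      · exact Or.inr ⟨d, Or.inl rfl, h⟩
      · exact Or.inr ⟨e, Or.inr he, rfl⟩
    · rintro (h | ⟨e, (rfl | he), rfl⟩)
      · exact Or.inl (Or.inl h)
      · exact Or.inl (Or.inr rfl)
      · exact Or.inr ⟨e, he, rfl⟩

theorem mem_outer_fold (ps : List (Int × Char)) (offs : List Int) (s : PySem.Set Int) (y : Int) :
    y ∈ ps.foldl (fun acc p => if partCharB p.2 then offs.foldl (fun a d => PySem.Set.add a (p.1 + d)) acc else acc) s
      ↔ y ∈ s ∨ ∃ p ∈ ps, partCharB p.2 ∧ ∃ d ∈ offs, y = p.1 + d := by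
  induction ps generalizing s with
  | nil => simp
  | cons p ps ih =>
    simp only [List.foldl_cons, ih, List.mem_cons]
    by_cases hp : partCharB p.2
    · simp only [hp, if_true, mem_inner_fold]
      constructor
      · rintro ((h | h) | ⟨q, hq, hqc, hd⟩)
        · exact Or.inl h
        · exact Or.inr ⟨p, Or.inl rfl, hp, h⟩
        · exact Or.inr ⟨q, Or.inr hq, hqc, hd⟩
      · rintro (h | ⟨q, (rfl | hq), hqc, hd⟩)
        · exact Or.inl (Or.inl h)
        · exact Or.inl (Or.inr hd)
        · exact Or.inr ⟨q, hq, hqc, hd⟩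
    · simp only [hp]
      constructor
      · rintro (h | ⟨q, hq, hqc, hd⟩)
        · exact Or.inl h
        · exact Or.inr ⟨q, Or.inr hq, hqc, hd⟩
      · rintro (h | ⟨q, (rfl | hq), hqc, hd⟩)
        · exact Or.inl h
        · exact absurd hqc hp
        · exact Or.inr ⟨q, hq, hqc, hd⟩

theorem symAt_iff (str : String) (j : Int) :
    symAt (some str) j = true ↔
      ∃ (k : Nat) (_ : k < str.toList.length), partCharA str.toList[k] = true ∧ j = (k : Int) := by
  simp only [symAt, insideBounds, charGet, Bool.and_eq_true]
  constructor
  · rintro ⟨hb, hc⟩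
    have hb' : 0 ≤ j ∧ j < (str.toList.length : Int) := by
      by_contra hcon; rw [if_neg hcon] at hb; exact Bool.false_ne_true hb
    obtain ⟨h0, hlt⟩ := hb'
    have hk : j.toNat < str.toList.length := by omega
    have hg : PySem.List.pyGet? str.toList j = some str.toList[j.toNat] :=
      PySem.List.pyGet?_eq_some_getElem _ h0 hlt
    rw [hg] at hc
    exact ⟨j.toNat, hk, hc, by omega⟩
  · rintro ⟨k, hk, hc, rfl⟩
    refine ⟨by rw [if_pos ⟨Int.natCast_nonneg k, by exact_mod_cast hk⟩], ?_⟩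
    rw [PySem.List.pyGet?_natCast, List.getElem?_eq_getElem hk]
    exact hc

theorem mem_addLine (l : Option String) (offs : List Int) (s : PySem.Set Int) (y : Int) :
    y ∈ addLine l offs s ↔ y ∈ s ∨ ∃ d ∈ offs, symAt l (y - d) = true := by
  cases l with
  | none => simp [addLine, symAt, insideBounds]
  | some str =>
    rw [addLine, mem_outer_fold]
    constructor
    · rintro (h | ⟨p, hp, hpc, d, hd, rfl⟩)
      · exact Or.inl h
      · rw [PySem.List.mem_enumerate_iff] at hp
        obtain ⟨k, hk, rfl⟩ := hp
        refine Or.inr ⟨d, hd, (symAt_iff _ _).2 ⟨k, hk, ?_, by simp⟩⟩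
        simpa [partChar_eq] using hpc
    · rintro (h | ⟨d, hd, hs⟩)
      · exact Or.inl h
      · obtain ⟨k, hk, hc, hjk⟩ := (symAt_iff _ _).1 hs
        refine Or.inr ⟨(k, str.toList[k]), ?_, by simpa [partChar_eq], d, hd, by omega⟩
        rw [PySem.List.mem_enumerate_iff]
        exact ⟨k, hk, by simp⟩

theorem contains_active (top line bottom : Option String) (i : Int) :
    PySem.Set.contains
      (addLine line [-1, 1] (addLine bottom [-1, 0, 1] (addLine top [-1, 0, 1] PySem.Set.empty))) i
      = (symAt top i || symAt bottom i || symAt bottom (i - 1) || symAt top (i - 1) ||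
         symAt bottom (i + 1) || symAt top (i + 1) || symAt line (i + 1) || symAt line (i - 1)) := by
  rw [Bool.eq_iff_iff, PySem.Set.contains_iff]
  simp only [mem_addLine, PySem.Set.empty, List.not_mem_nil, false_or,
    List.mem_cons, List.not_mem_nil, or_false, Bool.or_eq_true]
  constructor
  · rintro ((⟨d, hd, hs⟩ | ⟨d, hd, hs⟩) | ⟨d, hd, hs⟩) <;>
      rcases hd with rfl | rfl | rfl <;> simp_all
  · rintro (((((((h | h) | h) | h) | h) | h) | h) | h)
    · exact Or.inl (Or.inl ⟨0, by simp, by simpa using h⟩)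
    · exact Or.inl (Or.inr ⟨0, by simp, by simpa using h⟩)
    · exact Or.inl (Or.inr ⟨1, by simp, h⟩)
    · exact Or.inl (Or.inl ⟨1, by simp, h⟩)
    · exact Or.inl (Or.inr ⟨-1, by simp, by simpa [sub_neg_eq_add] using h⟩)
    · exact Or.inl (Or.inl ⟨-1, by simp, by simpa [sub_neg_eq_add] using h⟩)
    · exact Or.inr ⟨-1, by simp, by simpa [sub_neg_eq_add] using h⟩
    · exact Or.inr ⟨1, by simp, h⟩

theorem ifOr (c : Bool) (e : Bool) : (if c then true else e) = (c || e) := by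
  cases c <;> simp

theorem checkIdx_eq (top line bottom : Option String) (idxs : List Int) :
    checkIdxA top line bottom idxs =
      idxs.any (fun i =>
        symAt top i || symAt bottom i || symAt bottom (i - 1) || symAt top (i - 1) ||
        symAt bottom (i + 1) || symAt top (i + 1) || symAt line (i + 1) || symAt line (i - 1)) := by
  induction idxs with
  | nil => rfl
  | cons i rest ih =>
    simp only [checkIdxA, List.any_cons, ih, ifOr, symAt]
    ac_rfl

-- ===== VERDICT =====
theorem is_valid_part_spec : Claim_equal_is_valid_part := by
  intro top line bottom numbers _
  unfold Spec_is_valid_part is_valid_part is_valid_part_alt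
  rw [PySem.List.foldl_append_singleton_eq_map]
  refine List.map_congr_left (fun idxs _ => ?_)
  rw [checkIdx_eq]
  simp only [contains_active]
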